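-- pv_equiv track=rewrite | github.com/rubybee/SessionMessenger-analysis | decrypt code/line_decrypt.py | sub_101578ee0
-- ===== SOURCE A (Python) =====
-- def sub_101578ee0(enc_value, result, len_enc_value, au = 0):
--     array1 = [-1] * 43 + [0x3e] + [-1] * 3 + [0x3f, 0x34, 0x35, 0x36, 0x37, 0x38, 0x39, 0x3a, 0x3b, 0x3c, 0x3d] + [-1] * 7 + [n for n in range(26)] + [-1] * 6 + [n for n in range(26, 52)] + [-1] * 100
--     array2 = [0, 0, 0]
--     choosed_array = array1
--     if au:
--         choosed_array = array2
--     counter, result_counter, last_value, now_point = 0, 0, 0, 0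
--     while(True):
--         if now_point == len_enc_value:
--             break
--         now_value = choosed_array[ord((enc_value[now_point]))]
--         if now_value == -1:
--             now_value = last_value
--
--         elif counter == 0:
--             counter = 1
--
--         elif counter == 1:
--             counter = 2
--             if result_counter < len_enc_value:
--                 result_counter += 1
--                 result += [(((now_value >> 4) & 3) + last_value * 4) & 0xff]
--
--         elif counter == 2:
--             counter = 3
--             if result_counter < len_enc_value:
--                 result_counter += 1
--                 result += [((16 * last_value) | (now_value >> 2) & 0xf) & 0xff]
--
--         elif counter == 3:
--             counter = 0
--             if result_counter < len_enc_value: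
--                 result_counter += 1
--                 result += [(now_value | (last_value << 6)) & 0xff]
--
--         else:
--             pass
--         last_value = now_value
--         now_point += 1
--
--     return result_counter
-- ===== SOURCE B (Python) =====
-- def sub_101578ee0(enc_value, result, len_enc_value, au = 0):
--     array1 = [-1] * 43 + [0x3e] + [-1] * 3 + [0x3f, 0x34, 0x35, 0x36, 0x37, 0x38, 0x39, 0x3a, 0x3b, 0x3c, 0x3d] + [-1] * 7 + [n for n in range(26)] + [-1] * 6 + [n for n in range(26, 52)] + [-1] * 100
--     array2 = [0, 0, 0]
--     table = array2 if au else array1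
--     # pass 1: the 6-bit values of the valid characters only
--     vals = []
--     i = 0
--     while i != len_enc_value:
--         v = table[ord(enc_value[i])]
--         if v != -1:
--             vals.append(v)
--         i += 1
--     # pass 2: emit one output byte for each non-multiple-of-4 position
--     result_counter = 0
--     for k in range(1, len(vals)):
--         r = k % 4
--         if r and result_counter < len_enc_value:
--             prev, v = vals[k - 1], vals[k]
--             if r == 1:
--                 result.append((((v >> 4) & 3) + prev * 4) & 0xff)
--             elif r == 2:
--                 result.append(((16 * prev) | ((v >> 2) & 0xf)) & 0xff)
--             else:
--                 result.append((v | (prev << 6)) & 0xff)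
--             result_counter += 1
--     return result_counter
-- ===== Notes on version B (the rewrite author's own statement) =====
-- stated objective: alternative
-- what changed: Replaces A's single-pass four-state machine (counter/last_value threaded through every character, with invalid characters re-feeding last_value) by two passes: first collect the 6-bit table values of the valid characters, then emit one output byte per non-multiple-of-4 position from adjacent pairs of that list.
-- outside the precondition, e.g. on sub_101578ee0('AB', [], 5, 0): A raises IndexError, B raises IndexError; on sub_101578ee0('AB', [], 2, 1): A raises IndexError, B raises IndexError
import Mathlib
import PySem

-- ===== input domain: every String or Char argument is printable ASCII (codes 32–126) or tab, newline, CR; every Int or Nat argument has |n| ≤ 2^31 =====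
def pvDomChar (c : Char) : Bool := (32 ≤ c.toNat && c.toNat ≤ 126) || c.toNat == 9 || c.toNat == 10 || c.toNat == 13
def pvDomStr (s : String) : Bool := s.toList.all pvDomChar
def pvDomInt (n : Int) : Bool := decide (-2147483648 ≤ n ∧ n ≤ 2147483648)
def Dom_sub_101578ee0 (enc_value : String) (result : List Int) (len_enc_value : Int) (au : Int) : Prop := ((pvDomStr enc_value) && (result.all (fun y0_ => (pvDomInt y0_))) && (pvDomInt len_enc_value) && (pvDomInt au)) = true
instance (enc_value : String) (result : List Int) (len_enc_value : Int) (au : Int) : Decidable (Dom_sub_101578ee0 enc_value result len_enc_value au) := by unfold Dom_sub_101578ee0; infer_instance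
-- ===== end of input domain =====

-- B replaces A's one-pass four-state (counter/last_value) machine by two passes: first collect
-- the 6-bit values of the valid characters, then emit one byte per non-multiple-of-4 position.
-- Objective: alternative decomposition (same cost). Equivalence is about the RETURN value; both
-- Pythons also append the same bytes to `result` in place.

-- ===== PORT A =====
-- the base64 decode table (shared constant, built exactly as in the Python)
def pvArray1 : List Int :=
  List.replicate 43 (-1) ++ [0x3e] ++ List.replicate 3 (-1) ++
  [0x3f, 0x34, 0x35, 0x36, 0x37, 0x38, 0x39, 0x3a, 0x3b, 0x3c, 0x3d] ++
  List.replicate 7 (-1) ++ (PySem.List.pyRange 0 26 1) ++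
  List.replicate 6 (-1) ++ (PySem.List.pyRange 26 52 1) ++ List.replicate 100 (-1)

-- A's while loop over the first len_enc_value characters; `.getD 0` marks the IndexError
-- case (table too short), which Pre_ excludes.
def subA_loop (table : List Int) (chars : List Char) (len_enc_value counter result_counter last_value : Int) (result : List Int) : Int :=
  match chars with
  | [] => result_counter
  | c :: rest =>
    let nv := (PySem.List.pyGet? table ((c.toNat : Int))).getD 0
    if nv = -1 then
      -- now_value := last_value; last_value := now_value  (state unchanged)
      subA_loop table rest len_enc_value counter result_counter last_value result
    else if counter = 0 then
      subA_loop table rest len_enc_value 1 result_counter nv result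
    else if counter = 1 then
      if result_counter < len_enc_value then
        subA_loop table rest len_enc_value 2 (result_counter + 1) nv (result ++ [PySem.Int.band (PySem.Int.band (nv >>> 4) 3 + last_value * 4) 0xff])
      else subA_loop table rest len_enc_value 2 result_counter nv result
    else if counter = 2 then
      if result_counter < len_enc_value then
        subA_loop table rest len_enc_value 3 (result_counter + 1) nv (result ++ [PySem.Int.band (PySem.Int.bor (16 * last_value) (PySem.Int.band (nv >>> 2) 0xf)) 0xff])
      else subA_loop table rest len_enc_value 3 result_counter nv result
    else if counter = 3 then
      if result_counter < len_enc_value then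
        subA_loop table rest len_enc_value 0 (result_counter + 1) nv (result ++ [PySem.Int.band (PySem.Int.bor nv (last_value <<< 6)) 0xff])
      else subA_loop table rest len_enc_value 0 result_counter nv result
    else
      subA_loop table rest len_enc_value counter result_counter nv result

def sub_101578ee0 (enc_value : String) (result : List Int) (len_enc_value : Int) (au : Int) : Int :=
  let choosed_array := if au ≠ 0 then ([0, 0, 0] : List Int) else pvArray1
  subA_loop choosed_array (enc_value.toList.take len_enc_value.toNat) len_enc_value 0 0 0 result

-- ===== PORT B =====
-- pass 1: the 6-bit values of the valid characters only
def subB_vals (table : List Int) (chars : List Char) : List Int :=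
  match chars with
  | [] => []
  | c :: rest =>
    let v := (PySem.List.pyGet? table ((c.toNat : Int))).getD 0
    if v ≠ -1 then v :: subB_vals table rest else subB_vals table rest

-- pass 2: for k = 1, 2, … over vals, with prev = vals[k-1] and v = vals[k]
def subB_loop (vals : List Int) (k : Nat) (prev len_enc_value result_counter : Int) (result : List Int) : Int :=
  match vals with
  | [] => result_counter
  | v :: rest =>
    let r := k % 4
    if r ≠ 0 ∧ result_counter < len_enc_value then
      let b :=
        if r = 1 then PySem.Int.band (PySem.Int.band (v >>> 4) 3 + prev * 4) 0xff
        else if r = 2 then PySem.Int.band (PySem.Int.bor (16 * prev) (PySem.Int.band (v >>> 2) 0xf)) 0xff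
        else PySem.Int.band (PySem.Int.bor v (prev <<< 6)) 0xff
      subB_loop rest (k + 1) v len_enc_value (result_counter + 1) (result ++ [b])
    else
      subB_loop rest (k + 1) v len_enc_value result_counter result

def sub_101578ee0_alt (enc_value : String) (result : List Int) (len_enc_value : Int) (au : Int) : Int :=
  let table := if au ≠ 0 then ([0, 0, 0] : List Int) else pvArray1
  match subB_vals table (enc_value.toList.take len_enc_value.toNat) with
  | [] => 0
  | v0 :: rest => subB_loop rest 1 v0 len_enc_value 0 result

-- ===== PRECONDITION & SPEC =====
-- Pre_ excludes exactly the inputs where A raises IndexError (or loops past the string's end):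
-- len_enc_value out of [0, len(enc_value)], or a truthy au with a nonempty scan (array2 has length 3,
-- below every printable code point).
def Pre_sub_101578ee0 (enc_value : String) (result : List Int) (len_enc_value : Int) (au : Int) : Prop :=
  0 ≤ len_enc_value ∧ len_enc_value ≤ (enc_value.toList.length : Int) ∧ (au = 0 ∨ len_enc_value = 0)
instance (enc_value : String) (result : List Int) (len_enc_value : Int) (au : Int) : Decidable (Pre_sub_101578ee0 enc_value result len_enc_value au) := by unfold Pre_sub_101578ee0; infer_instance

def pvWitness_sub_101578ee0 : String × List Int × Int × Int := ("QUJDRA==", [], 8, 0)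

def Spec_sub_101578ee0 (enc_value : String) (result : List Int) (len_enc_value : Int) (au : Int) (out : Int) : Prop := out = sub_101578ee0_alt enc_value result len_enc_value au
instance (enc_value : String) (result : List Int) (len_enc_value : Int) (au : Int) (out : Int) : Decidable (Spec_sub_101578ee0 enc_value result len_enc_value au out) := by unfold Spec_sub_101578ee0; infer_instance

-- ===== CLAIM (what is proved, stated in full; the proofs are below) =====
def Claim_equal_sub_101578ee0 : Prop := ∀ (enc_value : String) (result : List Int) (len_enc_value : Int) (au : Int), Dom_sub_101578ee0 enc_value result len_enc_value au → Pre_sub_101578ee0 enc_value result len_enc_value au → Spec_sub_101578ee0 enc_value result len_enc_value au (sub_101578ee0 enc_value result len_enc_value au)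

-- ===== LEMMAS AND PROOFS =====

-- A's state machine on the raw characters equals B's pass 2 on the filtered values:
-- counter tracks k % 4 and last_value tracks vals[k-1].
lemma subA_eq_subB_loop (table : List Int) (len_enc_value : Int) :
    ∀ (chars : List Char) (k : Nat) (last_value result_counter : Int) (result : List Int),
      subA_loop table chars len_enc_value ((k % 4 : Nat) : Int) result_counter last_value result
        = subB_loop (subB_vals table chars) k last_value len_enc_value result_counter result := by
  intro chars
  induction chars with
  | nil => intro k last rc res; simp [subA_loop, subB_vals, subB_loop]
  | cons c rest ih =>
    intro k last rc res
    rw [subA_loop, subB_vals]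
    by_cases hv : ((PySem.List.pyGet? table ((c.toNat : Int))).getD 0) = -1
    · simp only [hv, if_neg (by simp : ¬ (-1 : Int) ≠ -1)]
      exact ih k last rc res
    · simp only [if_neg hv, if_pos hv]
      rw [subB_loop]
      set nv := (PySem.List.pyGet? table ((c.toNat : Int))).getD 0 with hnv
      have hk4 : k % 4 = 0 ∨ k % 4 = 1 ∨ k % 4 = 2 ∨ k % 4 = 3 := by omega
      rcases hk4 with h | h | h | h
      · rw [h]
        have h1 : (((k + 1) % 4 : Nat) : Int) = 1 := by omega
        norm_num
        rw [← h1]; exact ih _ _ _ _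
      · rw [h]
        have h1 : (((k + 1) % 4 : Nat) : Int) = 2 := by omega
        norm_num
        split_ifs <;> (rw [← h1]; exact ih _ _ _ _)
      · rw [h]
        have h1 : (((k + 1) % 4 : Nat) : Int) = 3 := by omega
        norm_num
        split_ifs <;> (rw [← h1]; exact ih _ _ _ _)
      · rw [h]
        have h1 : (((k + 1) % 4 : Nat) : Int) = 0 := by omega
        norm_num
        split_ifs <;> (rw [← h1]; exact ih _ _ _ _)

lemma subB_loop_zero (vals : List Int) (len_enc_value : Int) (result : List Int) :
    subB_loop vals 0 0 len_enc_value 0 result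
      = match vals with
        | [] => 0
        | v0 :: rest => subB_loop rest 1 v0 len_enc_value 0 result := by
  cases vals with
  | nil => simp [subB_loop]
  | cons v rest => rw [subB_loop]; norm_num

-- ===== VERDICT (by name: the statement is the Claim_ definition above) =====
theorem sub_101578ee0_spec : Claim_equal_sub_101578ee0 := by
  intro enc_value result len_enc_value au _ _
  unfold Spec_sub_101578ee0 sub_101578ee0 sub_101578ee0_alt
  have h := subA_eq_subB_loop (if au ≠ 0 then ([0,0,0] : List Int) else pvArray1) len_enc_value
    (enc_value.toList.take len_enc_value.toNat) 0 0 0 result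
  simp only [Nat.zero_mod, Nat.cast_zero] at h
  rw [h, subB_loop_zero]
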